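-- pv_equiv track=rewrite | github.com/pypi-data/pypi-mirror-302 | packages/bcsl-python/bcsl_python-0.2.0.tar.gz/bcsl_python-0.2.0/bcsl/bcsl.py | find_asymmetric_edges_mb
-- ===== SOURCE A (Python) =====
-- def find_asymmetric_edges_mb(markov_blankets):
--     """
--     Identify asymmetric edges in the markov_blanket.
--     :param markov_blankets: The learned skeleton from the original dataset.
--     :return: List of asymmetric edges.
--     """
--     asymmetric_edges = []
--     symmetric_edges = []
--     n_vars = len(markov_blankets)
--     for i in range(n_vars):
--         for j in range(i + 1, n_vars):
--             if (i in markov_blankets[j]) and (j not in markov_blankets[i]):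
--                 asymmetric_edges.append((i, j))
--             elif (j in markov_blankets[i]) and (i not in markov_blankets[j]):
--                 asymmetric_edges.append((i, j))
--             elif (i in markov_blankets[j]) and (j in markov_blankets[i]):
--                 symmetric_edge = (i, j) if i < j else (j, i)
--                 if symmetric_edge not in asymmetric_edges:
--                     symmetric_edges.append(symmetric_edge)
--     return asymmetric_edges, symmetric_edges
-- ===== SOURCE B (Python) =====
-- def find_asymmetric_edges_mb(markov_blankets):
--     """One pass over the blankets records, per unordered pair, which of the two
--     directions was observed; pairs with exactly one direction are asymmetric,
--     pairs with both are symmetric; each result is sorted lexicographically."""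
--     n = len(markov_blankets)
--     down = set()  # pairs (i, j), i < j, with i in markov_blankets[j]
--     up = set()    # pairs (i, j), i < j, with j in markov_blankets[i]
--     for u, mb in enumerate(markov_blankets):
--         for m in mb:
--             if 0 <= m < n and m != u:
--                 if m < u:
--                     down.add((m, u))
--                 else:
--                     up.add((u, m))
--     return sorted(down ^ up), sorted(down & up)
-- ===== Notes on version B (the rewrite author's own statement) =====
-- stated objective: faster
-- what changed: Replaces A's O(n^2) pair-by-pair membership scans with a single pass over the blankets that records each observed direction of every unordered pair into two sets, then classifies pairs by set algebra (symmetric difference = asymmetric, intersection = symmetric) and sorts each result lexicographically to recover A's ordering.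
import Mathlib
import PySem

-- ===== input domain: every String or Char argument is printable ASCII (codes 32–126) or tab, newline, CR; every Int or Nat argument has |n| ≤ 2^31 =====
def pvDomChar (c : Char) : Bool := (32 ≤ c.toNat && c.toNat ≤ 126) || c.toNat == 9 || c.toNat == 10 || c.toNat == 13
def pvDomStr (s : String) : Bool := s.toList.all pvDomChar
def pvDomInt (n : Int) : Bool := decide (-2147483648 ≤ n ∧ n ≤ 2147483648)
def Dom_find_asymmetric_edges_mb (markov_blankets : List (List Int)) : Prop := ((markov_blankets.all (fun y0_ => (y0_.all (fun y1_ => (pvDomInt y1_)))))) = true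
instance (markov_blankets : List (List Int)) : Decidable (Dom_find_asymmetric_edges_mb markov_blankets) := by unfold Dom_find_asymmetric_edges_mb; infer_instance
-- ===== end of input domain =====

-- B replaces A's quadratic pair-by-pair membership scan with one pass over the blankets that
-- records the observed direction(s) of each unordered pair into two sets, then classifies the
-- pairs by set algebra and sorts; objective: faster (no n² pair enumeration).

-- ===== PORT A =====
-- the body of A's inner loop (one (i, j) pair)
def pvStepA (markov_blankets : List (List Int)) (st : List (Int × Int) × List (Int × Int))
    (i j : Int) : List (Int × Int) × List (Int × Int) :=
  if (PySem.List.pyGetD markov_blankets j []).contains i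
      && !((PySem.List.pyGetD markov_blankets i []).contains j) then
    (st.1 ++ [(i, j)], st.2)
  else if (PySem.List.pyGetD markov_blankets i []).contains j
      && !((PySem.List.pyGetD markov_blankets j []).contains i) then
    (st.1 ++ [(i, j)], st.2)
  else if (PySem.List.pyGetD markov_blankets j []).contains i
      && (PySem.List.pyGetD markov_blankets i []).contains j then
    let symmetric_edge := if i < j then (i, j) else (j, i)
    if !(st.1.contains symmetric_edge) then (st.1, st.2 ++ [symmetric_edge]) else st
  else st

def find_asymmetric_edges_mb (markov_blankets : List (List Int)) :
    (List (Int × Int)) × (List (Int × Int)) :=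
  let n_vars : Int := markov_blankets.length
  (PySem.List.pyRange 0 n_vars 1).foldl
    (fun st i =>
      (PySem.List.pyRange (i + 1) n_vars 1).foldl
        (fun st j => pvStepA markov_blankets st i j) st)
    ([], [])

-- ===== PORT B =====
-- record one observed member m of the blanket of node u into the direction sets
def pvRecB (n : Int) (st : PySem.Set (Int × Int) × PySem.Set (Int × Int)) (u m : Int) :
    PySem.Set (Int × Int) × PySem.Set (Int × Int) :=
  if 0 ≤ m ∧ m < n ∧ m ≠ u then
    if m < u then (PySem.Set.add st.1 (m, u), st.2) else (st.1, PySem.Set.add st.2 (u, m))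
  else st

def find_asymmetric_edges_mb_alt (markov_blankets : List (List Int)) :
    (List (Int × Int)) × (List (Int × Int)) :=
  let n : Int := markov_blankets.length
  let st :=
    (PySem.List.enumerate markov_blankets 0).foldl
      (fun st um => um.2.foldl (fun st m => pvRecB n st um.1 m) st)
      (PySem.Set.empty, PySem.Set.empty)
  (PySem.List.sorted2 (PySem.Set.symmDiff st.1 st.2) Prod.fst Prod.snd,
   PySem.List.sorted2 (PySem.Set.inter st.1 st.2) Prod.fst Prod.snd)

-- ===== PRECONDITION & SPEC =====
def Spec_find_asymmetric_edges_mb (markov_blankets : List (List Int)) (out : (List (Int × Int)) × (List (Int × Int))) : Prop := out = find_asymmetric_edges_mb_alt markov_blankets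
instance (markov_blankets : List (List Int)) (out : (List (Int × Int)) × (List (Int × Int))) : Decidable (Spec_find_asymmetric_edges_mb markov_blankets out) := by unfold Spec_find_asymmetric_edges_mb; infer_instance

-- ===== CLAIM (what is proved, stated in full; the proofs are below) =====
def Claim_equal_find_asymmetric_edges_mb : Prop := ∀ (markov_blankets : List (List Int)), Dom_find_asymmetric_edges_mb markov_blankets → Spec_find_asymmetric_edges_mb markov_blankets (find_asymmetric_edges_mb markov_blankets)

-- ===== LEMMAS AND PROOFS =====

-- the pairs 0 ≤ i < j < n in A's generation order (lexicographic)
def pvLexPairs (n : Int) : List (Int × Int) :=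
  (PySem.List.pyRange 0 n 1).flatMap
    (fun i => (PySem.List.pyRange (i + 1) n 1).map (fun j => (i, j)))

-- exactly one direction observed (A's asymmetric condition)
def pvAP (markov_blankets : List (List Int)) (p : Int × Int) : Bool :=
  ((PySem.List.pyGetD markov_blankets p.2 []).contains p.1)
    ^^ ((PySem.List.pyGetD markov_blankets p.1 []).contains p.2)

-- both directions observed (A's symmetric condition)
def pvSP (markov_blankets : List (List Int)) (p : Int × Int) : Bool :=
  ((PySem.List.pyGetD markov_blankets p.2 []).contains p.1)
    && ((PySem.List.pyGetD markov_blankets p.1 []).contains p.2)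

theorem pv_mem_lexPairs (n : Int) (p : Int × Int) :
    p ∈ pvLexPairs n ↔ 0 ≤ p.1 ∧ p.1 < p.2 ∧ p.2 < n := by
  simp only [pvLexPairs, List.mem_flatMap, List.mem_map, PySem.List.mem_pyRange_one]
  constructor
  · rintro ⟨i, ⟨h0, h1⟩, j, ⟨h2, h3⟩, rfl⟩
    exact ⟨h0, by omega, h3⟩
  · rintro ⟨h0, h1, h2⟩
    exact ⟨p.1, ⟨h0, by omega⟩, p.2, ⟨by omega, h2⟩, rfl⟩

theorem pv_pairwise_lexPairs (n : Int) :
    (pvLexPairs n).Pairwise (fun a b => (toLex a : Lex (Int × Int)) < toLex b) := by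
  rw [pvLexPairs, List.pairwise_flatMap]
  constructor
  · intro a _
    rw [List.pairwise_map]
    refine (PySem.List.pairwise_lt_pyRange_one _ _).imp ?_
    intro x y hxy
    rw [Prod.Lex.lt_iff]
    exact Or.inr ⟨rfl, hxy⟩
  · refine (PySem.List.pairwise_lt_pyRange_one _ _).imp ?_
    rintro a b hab x hx y hy
    simp only [List.mem_map] at hx hy
    obtain ⟨j, _, rfl⟩ := hx
    obtain ⟨j', _, rfl⟩ := hy
    rw [Prod.Lex.lt_iff]
    exact Or.inl hab

theorem pv_nodup_lexPairs (n : Int) : (pvLexPairs n).Nodup := by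
  refine (pv_pairwise_lexPairs n).imp ?_
  intro a b hab heq
  subst heq
  exact lt_irrefl _ hab

-- A's nested loop, flattened over the pair list, computes the two filters
theorem pvA_main (mbs : List (List Int)) (L seen : List (Int × Int))
    (hnd : L.Nodup) (h : ∀ p ∈ L, p ∉ seen ∧ p.1 < p.2) :
    L.foldl (fun st p => pvStepA mbs st p.1 p.2)
        (seen.filter (pvAP mbs), seen.filter (pvSP mbs))
      = ((seen ++ L).filter (pvAP mbs), (seen ++ L).filter (pvSP mbs)) := by
  induction L generalizing seen with
  | nil => simp
  | cons p L ih =>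
    obtain ⟨hpnot, hplt⟩ := h p (List.mem_cons_self ..)
    rw [List.foldl_cons]
    have hstep : pvStepA mbs (seen.filter (pvAP mbs), seen.filter (pvSP mbs)) p.1 p.2
        = ((seen ++ [p]).filter (pvAP mbs), (seen ++ [p]).filter (pvSP mbs)) := by
      have hnf : p ∉ seen.filter (pvAP mbs) := fun h' => hpnot (List.mem_of_mem_filter h')
      by_cases hm1 : p.1 ∈ PySem.List.pyGetD mbs p.2 [] <;>
        by_cases hm2 : p.2 ∈ PySem.List.pyGetD mbs p.1 [] <;>
          simp [pvStepA, pvAP, pvSP, List.contains_eq_mem, hm1, hm2,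
                List.filter_append, hplt, hnf]
    rw [hstep, ih (seen ++ [p]) (List.Nodup.of_cons hnd) ?_, List.append_assoc,
        List.singleton_append]
    intro q hq
    refine ⟨fun hmem => ?_, (h q (List.mem_cons_of_mem _ hq)).2⟩
    rcases List.mem_append.mp hmem with hq' | hq'
    · exact (h q (List.mem_cons_of_mem _ hq)).1 hq'
    · rcases List.mem_singleton.mp hq' with rfl
      exact (List.nodup_cons.mp hnd).1 hq

theorem pvA_eq (mbs : List (List Int)) :
    find_asymmetric_edges_mb mbs
      = ((pvLexPairs mbs.length).filter (pvAP mbs),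
         (pvLexPairs mbs.length).filter (pvSP mbs)) := by
  have hnest : find_asymmetric_edges_mb mbs
      = (pvLexPairs mbs.length).foldl (fun st q => pvStepA mbs st q.1 q.2) ([], []) := by
    unfold find_asymmetric_edges_mb pvLexPairs
    rw [List.foldl_flatMap]
    simp only [List.foldl_map]
  have h0 : ∀ p ∈ pvLexPairs (mbs.length : Int), p ∉ ([] : List (Int × Int)) ∧ p.1 < p.2 := by
    intro p hp
    exact ⟨List.not_mem_nil, ((pv_mem_lexPairs _ p).mp hp).2.1⟩
  have := pvA_main mbs (pvLexPairs mbs.length) [] (pv_nodup_lexPairs _) h0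
  rw [hnest]
  simpa using this

-- B's inner loop: membership in the two direction sets
theorem pvB_inner_mem (n : Int) (mb : List Int) (u : Int)
    (st : PySem.Set (Int × Int) × PySem.Set (Int × Int)) (p : Int × Int) :
    (p ∈ (mb.foldl (fun st m => pvRecB n st u m) st).1
      ↔ p ∈ st.1 ∨ (p.2 = u ∧ 0 ≤ p.1 ∧ p.1 < n ∧ p.1 < u ∧ p.1 ∈ mb)) ∧
    (p ∈ (mb.foldl (fun st m => pvRecB n st u m) st).2
      ↔ p ∈ st.2 ∨ (p.1 = u ∧ 0 ≤ p.2 ∧ p.2 < n ∧ u < p.2 ∧ p.2 ∈ mb)) := by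
  induction mb generalizing st with
  | nil => simp
  | cons m t ih =>
    rw [List.foldl_cons]
    refine ⟨?_, ?_⟩
    · rw [(ih _).1]
      simp only [pvRecB]
      by_cases hg : 0 ≤ m ∧ m < n ∧ m ≠ u
      · obtain ⟨h0, h1, h2⟩ := hg
        rw [if_pos ⟨h0, h1, h2⟩]
        by_cases hlt : m < u
        · rw [if_pos hlt]
          simp only [PySem.Set.mem_add, List.mem_cons]
          constructor
          · rintro ((hp | rfl) | ⟨hu, ha, hb, hc, hm⟩)
            · exact Or.inl hp
            · exact Or.inr ⟨rfl, h0, h1, hlt, Or.inl rfl⟩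
            · exact Or.inr ⟨hu, ha, hb, hc, Or.inr hm⟩
          · rintro (hp | ⟨hu, ha, hb, hc, hm1 | hm⟩)
            · exact Or.inl (Or.inl hp)
            · exact Or.inl (Or.inr (Prod.ext_iff.mpr ⟨hm1, hu⟩))
            · exact Or.inr ⟨hu, ha, hb, hc, hm⟩
        · rw [if_neg hlt]
          simp only [List.mem_cons]
          constructor
          · rintro (hp | ⟨hu, ha, hb, hc, hm⟩)
            · exact Or.inl hp
            · exact Or.inr ⟨hu, ha, hb, hc, Or.inr hm⟩
          · rintro (hp | ⟨hu, ha, hb, hc, hm1 | hm⟩)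
            · exact Or.inl hp
            · omega
            · exact Or.inr ⟨hu, ha, hb, hc, hm⟩
      · rw [if_neg hg]
        simp only [List.mem_cons]
        constructor
        · rintro (hp | ⟨hu, ha, hb, hc, hm⟩)
          · exact Or.inl hp
          · exact Or.inr ⟨hu, ha, hb, hc, Or.inr hm⟩
        · rintro (hp | ⟨hu, ha, hb, hc, hm1 | hm⟩)
          · exact Or.inl hp
          · exact absurd ⟨by omega, by omega, by omega⟩ hg
          · exact Or.inr ⟨hu, ha, hb, hc, hm⟩
    · rw [(ih _).2]
      simp only [pvRecB]
      by_cases hg : 0 ≤ m ∧ m < n ∧ m ≠ u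
      · obtain ⟨h0, h1, h2⟩ := hg
        rw [if_pos ⟨h0, h1, h2⟩]
        by_cases hlt : m < u
        · rw [if_pos hlt]
          simp only [List.mem_cons]
          constructor
          · rintro (hp | ⟨hu, ha, hb, hc, hm⟩)
            · exact Or.inl hp
            · exact Or.inr ⟨hu, ha, hb, hc, Or.inr hm⟩
          · rintro (hp | ⟨hu, ha, hb, hc, hm1 | hm⟩)
            · exact Or.inl hp
            · omega
            · exact Or.inr ⟨hu, ha, hb, hc, hm⟩
        · rw [if_neg hlt]
          simp only [PySem.Set.mem_add, List.mem_cons]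
          constructor
          · rintro ((hp | rfl) | ⟨hu, ha, hb, hc, hm⟩)
            · exact Or.inl hp
            · exact Or.inr ⟨rfl, h0, h1, by omega, Or.inl rfl⟩
            · exact Or.inr ⟨hu, ha, hb, hc, Or.inr hm⟩
          · rintro (hp | ⟨hu, ha, hb, hc, hm1 | hm⟩)
            · exact Or.inl (Or.inl hp)
            · exact Or.inl (Or.inr (Prod.ext_iff.mpr ⟨hu, hm1⟩))
            · exact Or.inr ⟨hu, ha, hb, hc, hm⟩
      · rw [if_neg hg]
        simp only [List.mem_cons]
        constructor
        · rintro (hp | ⟨hu, ha, hb, hc, hm⟩)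
          · exact Or.inl hp
          · exact Or.inr ⟨hu, ha, hb, hc, Or.inr hm⟩
        · rintro (hp | ⟨hu, ha, hb, hc, hm1 | hm⟩)
          · exact Or.inl hp
          · exact absurd ⟨by omega, by omega, by omega⟩ hg
          · exact Or.inr ⟨hu, ha, hb, hc, hm⟩

theorem pvB_inner_nodup (n : Int) (mb : List Int) (u : Int)
    (st : PySem.Set (Int × Int) × PySem.Set (Int × Int))
    (hd : st.1.Nodup) (hs : st.2.Nodup) :
    (mb.foldl (fun st m => pvRecB n st u m) st).1.Nodup ∧
    (mb.foldl (fun st m => pvRecB n st u m) st).2.Nodup := by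
  induction mb generalizing st with
  | nil => exact ⟨hd, hs⟩
  | cons m t ih =>
    rw [List.foldl_cons]
    refine ih _ ?_ ?_ <;> simp only [pvRecB] <;> split_ifs <;>
      first
        | exact hd
        | exact hs
        | exact PySem.Set.nodup_add _ _ hd
        | exact PySem.Set.nodup_add _ _ hs

-- B's outer loop over enumerate: membership in the final direction sets
theorem pvB_outer_mem (n : Int) (mbs : List (List Int)) (k : Int)
    (st : PySem.Set (Int × Int) × PySem.Set (Int × Int)) (p : Int × Int) :
    (p ∈ ((PySem.List.enumerate mbs k).foldl
          (fun st um => um.2.foldl (fun st m => pvRecB n st um.1 m) st) st).1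
      ↔ p ∈ st.1 ∨ ∃ (idx : Nat) (h : idx < mbs.length),
          p.2 = k + idx ∧ 0 ≤ p.1 ∧ p.1 < n ∧ p.1 < p.2 ∧ p.1 ∈ mbs[idx]) ∧
    (p ∈ ((PySem.List.enumerate mbs k).foldl
          (fun st um => um.2.foldl (fun st m => pvRecB n st um.1 m) st) st).2
      ↔ p ∈ st.2 ∨ ∃ (idx : Nat) (h : idx < mbs.length),
          p.1 = k + idx ∧ 0 ≤ p.2 ∧ p.2 < n ∧ p.1 < p.2 ∧ p.2 ∈ mbs[idx]) := by
  induction mbs generalizing k st with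
  | nil => simp [PySem.List.enumerate]
  | cons mb rest ih =>
    rw [PySem.List.enumerate_cons, List.foldl_cons]
    refine ⟨?_, ?_⟩
    · rw [(ih _ _).1, (pvB_inner_mem n mb k st p).1]
      constructor
      · rintro ((hp | ⟨hu, ha, hb, hc, hm⟩) | ⟨idx, hidx, he, ha, hb, hc, hm⟩)
        · exact Or.inl hp
        · exact Or.inr ⟨0, by simp, by simpa using hu, ha, hb, by omega, by simpa using hm⟩
        · refine Or.inr ⟨idx + 1, by simpa using hidx, by push_cast; omega, ha, hb, hc, ?_⟩
          simpa using hm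
      · rintro (hp | ⟨idx, hidx, he, ha, hb, hc, hm⟩)
        · exact Or.inl (Or.inl hp)
        · cases idx with
          | zero =>
            exact Or.inl (Or.inr ⟨by simpa using he, ha, hb, by omega, by simpa using hm⟩)
          | succ j =>
            refine Or.inr ⟨j, by simpa using hidx, by push_cast at he ⊢; omega, ha, hb, hc, ?_⟩
            simpa using hm
    · rw [(ih _ _).2, (pvB_inner_mem n mb k st p).2]
      constructor
      · rintro ((hp | ⟨hu, ha, hb, hc, hm⟩) | ⟨idx, hidx, he, ha, hb, hc, hm⟩)
        · exact Or.inl hp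
        · exact Or.inr ⟨0, by simp, by simpa using hu, ha, hb, by omega, by simpa using hm⟩
        · refine Or.inr ⟨idx + 1, by simpa using hidx, by push_cast; omega, ha, hb, hc, ?_⟩
          simpa using hm
      · rintro (hp | ⟨idx, hidx, he, ha, hb, hc, hm⟩)
        · exact Or.inl (Or.inl hp)
        · cases idx with
          | zero =>
            exact Or.inl (Or.inr ⟨by simpa using he, ha, hb, by omega, by simpa using hm⟩)
          | succ j =>
            refine Or.inr ⟨j, by simpa using hidx, by push_cast at he ⊢; omega, ha, hb, hc, ?_⟩
            simpa using hm

theorem pvB_outer_nodup (n : Int) (mbs : List (List Int)) (k : Int)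
    (st : PySem.Set (Int × Int) × PySem.Set (Int × Int))
    (hd : st.1.Nodup) (hs : st.2.Nodup) :
    ((PySem.List.enumerate mbs k).foldl
        (fun st um => um.2.foldl (fun st m => pvRecB n st um.1 m) st) st).1.Nodup ∧
    ((PySem.List.enumerate mbs k).foldl
        (fun st um => um.2.foldl (fun st m => pvRecB n st um.1 m) st) st).2.Nodup := by
  induction mbs generalizing k st with
  | nil => exact ⟨hd, hs⟩
  | cons mb rest ih =>
    rw [PySem.List.enumerate_cons, List.foldl_cons]
    exact ih _ _ (pvB_inner_nodup n mb k st hd hs).1 (pvB_inner_nodup n mb k st hd hs).2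

-- Python's tuple sort of these pairs is the PySem sort under the lexicographic key
theorem pv_sorted2_eq_sorted_toLex (xs : List (Int × Int)) :
    PySem.List.sorted2 xs Prod.fst Prod.snd
      = PySem.List.sorted xs (fun p => (toLex p : Lex (Int × Int))) := by
  show List.foldl _ [] xs = List.foldl _ [] xs
  congr 1
  funext acc x
  congr 1
  funext a b
  by_cases h1 : a.1 < b.1 <;> by_cases h2 : b.1 < a.1 <;> by_cases h3 : a.2 < b.2 <;>
    simp [Prod.Lex.lt_iff, h1, h2, h3] <;> omega

theorem pvB_eq (mbs : List (List Int)) :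
    find_asymmetric_edges_mb_alt mbs
      = ((pvLexPairs mbs.length).filter (pvAP mbs),
         (pvLexPairs mbs.length).filter (pvSP mbs)) := by
  have hrfl : find_asymmetric_edges_mb_alt mbs
      = (PySem.List.sorted2 (PySem.Set.symmDiff
            ((PySem.List.enumerate mbs 0).foldl
              (fun st um => um.2.foldl (fun st m => pvRecB (mbs.length : Int) st um.1 m) st)
              (PySem.Set.empty, PySem.Set.empty)).1
            ((PySem.List.enumerate mbs 0).foldl
              (fun st um => um.2.foldl (fun st m => pvRecB (mbs.length : Int) st um.1 m) st)
              (PySem.Set.empty, PySem.Set.empty)).2) Prod.fst Prod.snd,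
         PySem.List.sorted2 (PySem.Set.inter
            ((PySem.List.enumerate mbs 0).foldl
              (fun st um => um.2.foldl (fun st m => pvRecB (mbs.length : Int) st um.1 m) st)
              (PySem.Set.empty, PySem.Set.empty)).1
            ((PySem.List.enumerate mbs 0).foldl
              (fun st um => um.2.foldl (fun st m => pvRecB (mbs.length : Int) st um.1 m) st)
              (PySem.Set.empty, PySem.Set.empty)).2) Prod.fst Prod.snd) := rfl
  rw [hrfl]
  set n : Int := (mbs.length : Int) with hn
  set st := (PySem.List.enumerate mbs 0).foldl
      (fun st um => um.2.foldl (fun st m => pvRecB n st um.1 m) st)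
      (PySem.Set.empty, PySem.Set.empty) with hst
  have hdown : ∀ p : Int × Int, p ∈ st.1 ↔
      0 ≤ p.1 ∧ p.1 < p.2 ∧ p.2 < n ∧ p.1 ∈ PySem.List.pyGetD mbs p.2 [] := by
    intro p
    rw [hst, (pvB_outer_mem n mbs 0 (PySem.Set.empty, PySem.Set.empty) p).1]
    constructor
    · rintro (h | ⟨idx, hidx, he, ha, hb, hc, hm⟩)
      · exact absurd h List.not_mem_nil
      · have h2a : (0 : Int) ≤ p.2 := by omega
        have h2b : p.2 < (mbs.length : Int) := by omega
        refine ⟨ha, hc, h2b, ?_⟩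
        rw [PySem.List.pyGetD_eq_getElem mbs [] h2a h2b]
        have hidx' : p.2.toNat = idx := by omega
        simpa [hidx'] using hm
    · rintro ⟨ha, hc, hb, hm⟩
      have h2a : (0 : Int) ≤ p.2 := by omega
      refine Or.inr ⟨p.2.toNat, by omega, by omega, ha, by omega, hc, ?_⟩
      rw [PySem.List.pyGetD_eq_getElem mbs [] h2a (by omega)] at hm
      exact hm
  have hup : ∀ p : Int × Int, p ∈ st.2 ↔
      0 ≤ p.1 ∧ p.1 < p.2 ∧ p.2 < n ∧ p.2 ∈ PySem.List.pyGetD mbs p.1 [] := by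
    intro p
    rw [hst, (pvB_outer_mem n mbs 0 (PySem.Set.empty, PySem.Set.empty) p).2]
    constructor
    · rintro (h | ⟨idx, hidx, he, ha, hb, hc, hm⟩)
      · exact absurd h List.not_mem_nil
      · have h1a : (0 : Int) ≤ p.1 := by omega
        have h1b : p.1 < (mbs.length : Int) := by omega
        refine ⟨h1a, hc, by omega, ?_⟩
        rw [PySem.List.pyGetD_eq_getElem mbs [] h1a h1b]
        have hidx' : p.1.toNat = idx := by omega
        simpa [hidx'] using hm
    · rintro ⟨ha, hc, hb, hm⟩
      refine Or.inr ⟨p.1.toNat, by omega, by omega, by omega, hb, hc, ?_⟩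
      rw [PySem.List.pyGetD_eq_getElem mbs [] ha (by omega)] at hm
      exact hm
  have hndst := pvB_outer_nodup n mbs 0 (PySem.Set.empty, PySem.Set.empty)
      List.nodup_nil List.nodup_nil
  rw [← hst] at hndst
  refine Prod.ext ?_ ?_
  · show PySem.List.sorted2 (PySem.Set.symmDiff st.1 st.2) Prod.fst Prod.snd = _
    rw [pv_sorted2_eq_sorted_toLex]
    apply PySem.List.sorted_eq_of_perm_of_pairwise_lt
    · rw [List.perm_ext_iff_of_nodup
        ((pv_nodup_lexPairs n).filter _)
        (PySem.Set.nodup_symmDiff _ _ hndst.1 hndst.2)]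
      intro a
      rw [List.mem_filter, pv_mem_lexPairs, PySem.Set.mem_symmDiff, hdown a, hup a]
      by_cases hm1 : a.1 ∈ PySem.List.pyGetD mbs a.2 [] <;>
        by_cases hm2 : a.2 ∈ PySem.List.pyGetD mbs a.1 [] <;>
          simp only [pvAP, List.contains_eq_mem, hm1, hm2, decide_true, decide_false,
            Bool.xor_true, Bool.xor_false, Bool.not_true, Bool.not_false, and_true,
            and_false, not_and, or_false, false_or, false_and,
            not_false_iff] <;> constructor <;> intro h <;> first | omega | tauto
    · exact ((pv_pairwise_lexPairs n).filter _)
  · show PySem.List.sorted2 (PySem.Set.inter st.1 st.2) Prod.fst Prod.snd = _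
    rw [pv_sorted2_eq_sorted_toLex]
    apply PySem.List.sorted_eq_of_perm_of_pairwise_lt
    · rw [List.perm_ext_iff_of_nodup
        ((pv_nodup_lexPairs n).filter _)
        (PySem.Set.nodup_inter _ _ hndst.1)]
      intro a
      rw [List.mem_filter, pv_mem_lexPairs, PySem.Set.mem_inter, hdown a, hup a]
      by_cases hm1 : a.1 ∈ PySem.List.pyGetD mbs a.2 [] <;>
        by_cases hm2 : a.2 ∈ PySem.List.pyGetD mbs a.1 [] <;>
          simp only [pvSP, List.contains_eq_mem, hm1, hm2, decide_true, decide_false,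
            Bool.and_true, Bool.and_false, and_true, and_false, false_and] <;>
        constructor <;> intro h <;> first | omega | tauto
    · exact ((pv_pairwise_lexPairs n).filter _)

-- ===== VERDICT (by name: the statement is the Claim_ definition above) =====
theorem find_asymmetric_edges_mb_spec : Claim_equal_find_asymmetric_edges_mb := by
  intro mbs _
  unfold Spec_find_asymmetric_edges_mb
  rw [pvA_eq, pvB_eq]
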